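-- pv_equiv track=rewrite | github.com/johBac97/mirex2025-musecoco | utils_midi/remi_utils.py | song_remi_split_to_segments
-- ===== SOURCE A (Python) =====
-- def from_remi_get_bar_idx(remi_seq):
--     # Get the starting token of each bar
--     start_token_index_of_the_bar = 0
--     bar_id = 0
--     bar_indices = {}
--
--     # bars_token_positions[bar_id] = (start token index of this bar, start token index of next bar)
--     for idx, token in enumerate(remi_seq):
--         if token == "b-1":
--             start_token_index_of_next_bar = idx + 1
--             bar_indices[bar_id] = (
--                 start_token_index_of_the_bar,
--                 start_token_index_of_next_bar,
--             )
--
--             # Go to the next bar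
--             start_token_index_of_the_bar = start_token_index_of_next_bar
--             bar_id = bar_id + 1
--     return bar_indices
--
-- def song_remi_split_to_segments(remi_seq, ts_and_tempo=False):
--     '''
--     Split the remi sequence of a song to a list of 2-bar segments
--     NOTE: An additional blank is insert in the beginning.
--     '''
--     if ts_and_tempo is False:
--         t = ['b-1'] + remi_seq
--     else:
--         ts = remi_seq[0]
--         tempo = remi_seq[1]
--         t = [ts, tempo, 'b-1'] + remi_seq
--     ret = []
--     bar_indices = from_remi_get_bar_idx(t)
--     for cur_bar_id in range(len(bar_indices)-1):
--         bar1_start_idx, bar1_end_idx = bar_indices[cur_bar_id]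
--         next_bar_id = cur_bar_id + 1
--         bar2_start_idx, bar2_end_idx = bar_indices[next_bar_id]
--         ret.append(t[bar1_start_idx:bar2_end_idx])
--     return ret
-- ===== SOURCE B (Python) =====
-- def song_remi_split_to_segments(remi_seq, ts_and_tempo=False):
--     '''
--     Split the remi sequence of a song to a list of 2-bar segments.
--     Groups tokens into complete 'b-1'-terminated bar chunks in one pass,
--     then concatenates consecutive pairs of chunks.
--     '''
--     if ts_and_tempo:
--         t = [remi_seq[0], remi_seq[1], 'b-1'] + remi_seq
--     else:
--         t = ['b-1'] + remi_seq
--     bars = []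
--     cur = []
--     for tok in t:
--         cur.append(tok)
--         if tok == 'b-1':
--             bars.append(cur)
--             cur = []
--     # tokens after the last 'b-1' form no complete bar and are dropped
--     return [bars[i] + bars[i + 1] for i in range(len(bars) - 1)]
-- ===== Notes on version B (the rewrite author's own statement) =====
-- stated objective: simpler
-- what changed: Replaces the bar-boundary index dict and index slicing with a single pass that collects complete bar chunks as token sublists, then concatenates consecutive chunk pairs.
import Mathlib
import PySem

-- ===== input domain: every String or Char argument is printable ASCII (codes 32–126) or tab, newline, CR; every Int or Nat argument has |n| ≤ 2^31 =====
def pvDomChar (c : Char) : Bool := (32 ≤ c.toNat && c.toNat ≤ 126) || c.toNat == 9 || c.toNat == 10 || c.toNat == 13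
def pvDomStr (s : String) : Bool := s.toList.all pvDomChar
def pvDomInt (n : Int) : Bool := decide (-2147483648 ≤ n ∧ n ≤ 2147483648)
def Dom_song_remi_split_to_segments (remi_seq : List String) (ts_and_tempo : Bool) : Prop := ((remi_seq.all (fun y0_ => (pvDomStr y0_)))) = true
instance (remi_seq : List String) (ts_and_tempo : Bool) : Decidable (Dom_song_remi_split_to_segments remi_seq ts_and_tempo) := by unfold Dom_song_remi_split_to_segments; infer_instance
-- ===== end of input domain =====

-- B replaces A's bar-boundary index dict + slicing with one pass that collects complete
-- bar chunks as token sublists and concatenates consecutive pairs (objective: simpler).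

-- ===== PORT A =====
-- loop body of from_remi_get_bar_idx; state = (start_token_index_of_the_bar, bar_id, bar_indices)
def barIdxStep (st : Int × Int × PySem.Dict Int (Int × Int)) (p : Int × String) :
    Int × Int × PySem.Dict Int (Int × Int) :=
  if p.2 == "b-1" then
    (p.1 + 1, st.2.1 + 1, st.2.2.insert st.2.1 (st.1, p.1 + 1))
  else st

def from_remi_get_bar_idx (remi_seq : List String) : PySem.Dict Int (Int × Int) :=
  ((PySem.List.enumerate remi_seq 0).foldl barIdxStep (0, 0, PySem.Dict.empty)).2.2

-- the 'for cur_bar_id in range(len(bar_indices)-1)' loop of A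
-- (Python's bar_indices[i] cannot raise KeyError here — keys are exactly 0..len-1 — so getD is exact)
def barLoopA (t : List String) : List (List String) :=
  let bar_indices := from_remi_get_bar_idx t
  (PySem.List.pyRange 0 ((bar_indices.size : Int) - 1) 1).foldl
    (fun ret cur_bar_id =>
      let p1 := bar_indices.getD cur_bar_id (0, 0)
      let p2 := bar_indices.getD (cur_bar_id + 1) (0, 0)
      ret ++ [PySem.List.slice t (some p1.1) (some p2.2)]) []

def song_remi_split_to_segments (remi_seq : List String) (ts_and_tempo : Bool) : List (List String) :=
  if ts_and_tempo = false then barLoopA (["b-1"] ++ remi_seq)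
  else match PySem.List.pyGet? remi_seq 0, PySem.List.pyGet? remi_seq 1 with
       | some ts, some tempo => barLoopA ([ts, tempo, "b-1"] ++ remi_seq)
       | _, _ => []  -- IndexError in Python, excluded by Pre_

-- ===== PORT B =====
-- loop body of B's single pass; state = (bars, cur)
def barChunkStep (st : List (List String) × List String) (tok : String) :
    List (List String) × List String :=
  let cur := st.2 ++ [tok]
  if tok == "b-1" then (st.1 ++ [cur], ([] : List String)) else (st.1, cur)

-- the comprehension [bars[i] + bars[i+1] for i in range(len(bars)-1)]
def pairLoopB (t : List String) : List (List String) :=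
  let bars := (t.foldl barChunkStep ([], [])).1
  (PySem.List.pyRange 0 ((bars.length : Int) - 1) 1).map
    (fun i => PySem.List.pyGetD bars i [] ++ PySem.List.pyGetD bars (i + 1) [])

def song_remi_split_to_segments_alt (remi_seq : List String) (ts_and_tempo : Bool) : List (List String) :=
  if ts_and_tempo then
    match remi_seq with  -- remi_seq[0], remi_seq[1]: IndexError (excluded by Pre_) unless ≥ 2 tokens
    | ts :: tempo :: _ => pairLoopB ([ts, tempo, "b-1"] ++ remi_seq)
    | _ => []
  else pairLoopB (["b-1"] ++ remi_seq)

-- ===== PRECONDITION & SPEC =====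
-- Pre_ excludes only the inputs where A raises IndexError: ts_and_tempo=True with fewer than 2 tokens.
def Pre_song_remi_split_to_segments (remi_seq : List String) (ts_and_tempo : Bool) : Prop :=
  ts_and_tempo = true → 2 ≤ remi_seq.length
instance (remi_seq : List String) (ts_and_tempo : Bool) : Decidable (Pre_song_remi_split_to_segments remi_seq ts_and_tempo) := by unfold Pre_song_remi_split_to_segments; infer_instance

def pvWitness_song_remi_split_to_segments : List String × Bool := (["o-0", "p-60", "b-1", "o-0", "b-1"], false)

def Spec_song_remi_split_to_segments (remi_seq : List String) (ts_and_tempo : Bool) (out : List (List String)) : Prop := out = song_remi_split_to_segments_alt remi_seq ts_and_tempo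
instance (remi_seq : List String) (ts_and_tempo : Bool) (out : List (List String)) : Decidable (Spec_song_remi_split_to_segments remi_seq ts_and_tempo out) := by unfold Spec_song_remi_split_to_segments; infer_instance

-- ===== CLAIM (what is proved, stated in full; the proofs are below) =====
def Claim_equal_song_remi_split_to_segments : Prop := ∀ (remi_seq : List String) (ts_and_tempo : Bool), Dom_song_remi_split_to_segments remi_seq ts_and_tempo → Pre_song_remi_split_to_segments remi_seq ts_and_tempo → Spec_song_remi_split_to_segments remi_seq ts_and_tempo (song_remi_split_to_segments remi_seq ts_and_tempo)

-- ===== LEMMAS AND PROOFS =====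

-- reference chunking: the complete 'b-1'-terminated bars of cur ++ xs (cur = tokens already read)
def chunksGo (cur : List String) : List String → List (List String)
  | [] => []
  | x :: xs => if x == "b-1" then (cur ++ [x]) :: chunksGo [] xs else chunksGo (cur ++ [x]) xs

-- the (start, end) index pairs A records, as a recursion
def pairsGo (start idx : Int) : List String → List (Int × Int)
  | [] => []
  | x :: xs => if x == "b-1" then (start, idx + 1) :: pairsGo (idx + 1) (idx + 1) xs
               else pairsGo start (idx + 1) xs

-- index pairs read off the chunk lengths
def pairsOf (s : Int) : List (List String) → List (Int × Int)
  | [] => []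
  | b :: bs => (s, s + b.length) :: pairsOf (s + b.length) bs

-- attach consecutive integer keys (the dict items)
def keyed (k : Int) : List (Int × Int) → List (Int × (Int × Int))
  | [] => []
  | p :: ps => (k, p) :: keyed (k + 1) ps

lemma chunksGo_foldl (xs : List String) : ∀ (bars : List (List String)) (cur : List String),
    (xs.foldl barChunkStep (bars, cur)).1 = bars ++ chunksGo cur xs := by
  induction xs with
  | nil => intro bars cur; simp [chunksGo]
  | cons x xs ih =>
    intro bars cur
    simp only [List.foldl_cons, chunksGo]
    by_cases h : x == "b-1" <;> simp [barChunkStep, h, ih]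

lemma afold (xs : List String) : ∀ (start idx k : Int) (d : PySem.Dict Int (Int × Int)),
    (∀ j ∈ d.keys, j < k) →
    ((PySem.List.enumerate xs idx).foldl barIdxStep (start, k, d)).2.2.items
      = d.items ++ keyed k (pairsGo start idx xs) := by
  induction xs with
  | nil => intro start idx k d _; simp [PySem.List.enumerate_nil, pairsGo, keyed]
  | cons x xs ih =>
    intro start idx k d hkeys
    rw [PySem.List.enumerate_cons]
    simp only [List.foldl_cons, pairsGo]
    by_cases h : x == "b-1"
    · have hfresh : d.contains k = false := by
        by_contra hc
        have : k ∈ d.keys := (PySem.Dict.contains_iff_mem_keys d k).mp (by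
          cases hcontains : d.contains k
          · exact absurd hcontains hc
          · rfl)
        exact absurd (hkeys k this) (lt_irrefl k)
      have hkeys' : ∀ j ∈ (d.insert k (start, idx + 1)).keys, j < k + 1 := by
        intro j hj
        rcases (PySem.Dict.mem_keys_insert d k j (start, idx + 1)).mp hj with h1 | h2
        · omega
        · have := hkeys j h2; omega
      simp only [barIdxStep, h, if_pos, keyed]
      rw [ih (idx + 1) (idx + 1) (k + 1) _ hkeys',
          PySem.Dict.items_insert_of_not_contains d (start, idx + 1) hfresh]
      simp
    · simp only [barIdxStep, h, if_neg, Bool.false_eq_true, not_false_iff]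
      exact ih start (idx + 1) k d hkeys

lemma pairsGo_eq_pairsOf (xs : List String) : ∀ (cur : List String) (start : Int),
    pairsGo start (start + cur.length) xs = pairsOf start (chunksGo cur xs) := by
  induction xs with
  | nil => intro cur start; simp [pairsGo, chunksGo, pairsOf]
  | cons x xs ih =>
    intro cur start
    by_cases h : x == "b-1"
    · simp only [pairsGo, chunksGo, h, if_pos, pairsOf]
      congr 1
      · simp only [Prod.mk.injEq, true_and, List.length_append, List.length_cons,
          List.length_nil]
        push_cast; ring
      · have := ih [] (start + cur.length + 1)
        simp only [List.length_nil, Nat.cast_zero, add_zero] at this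
        rw [this]
        congr 1
        simp only [List.length_append, List.length_cons, List.length_nil]
        push_cast; ring
    · simp only [pairsGo, chunksGo, h, Bool.false_eq_true, ite_false]
      have := ih (cur ++ [x]) start
      simp only [List.length_append, List.length_singleton] at this
      convert this using 2 <;> push_cast <;> ring

lemma keyed_length (ps : List (Int × Int)) : ∀ k, (keyed k ps).length = ps.length := by
  induction ps with
  | nil => intro k; rfl
  | cons p ps ih => intro k; simp [keyed, ih]

lemma keyed_map_fst (ps : List (Int × Int)) : ∀ k,
    (keyed k ps).map (·.1) = PySem.List.pyRange k (k + ps.length) 1 := by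
  induction ps with
  | nil => intro k; simp [keyed, PySem.List.pyRange_one_eq_nil]
  | cons p ps ih =>
    intro k
    have hlen : (k + ((p :: ps).length : Int)) = (k + 1) + (ps.length : Int) := by
      simp only [List.length_cons]; push_cast; ring
    rw [keyed, List.map_cons, ih (k + 1), hlen,
        PySem.List.pyRange_one_cons (show k < k + 1 + (ps.length : Int) by
          have : (0 : Int) ≤ (ps.length : Int) := Int.natCast_nonneg _
          omega)]

lemma keyed_getElem (ps : List (Int × Int)) : ∀ (k : Int) (j : Nat) (hj : j < ps.length),
    (keyed k ps)[j]'(by rw [keyed_length]; exact hj) = (k + j, ps[j]) := by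
  induction ps with
  | nil => intro k j hj; simp at hj
  | cons p ps ih =>
    intro k j hj
    cases j with
    | zero => simp [keyed]
    | succ j =>
      simp only [keyed, List.getElem_cons_succ]
      rw [ih (k + 1) j (by simpa using hj)]
      congr 1
      push_cast; ring

def offOf (bars : List (List String)) (j : Nat) : Nat := ((bars.take j).flatten).length

lemma pairsOf_length (bars : List (List String)) : ∀ s, (pairsOf s bars).length = bars.length := by
  induction bars with
  | nil => intro s; rfl
  | cons b bs ih => intro s; simp [pairsOf, ih]

lemma pairsOf_getElem (bars : List (List String)) : ∀ (s : Int) (j : Nat) (hj : j < bars.length),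
    (pairsOf s bars)[j]'(by rw [pairsOf_length]; exact hj)
      = (s + (offOf bars j : Int), s + (offOf bars (j + 1) : Int)) := by
  induction bars with
  | nil => intro s j hj; simp at hj
  | cons b bs ih =>
    intro s j hj
    cases j with
    | zero => simp [pairsOf, offOf]
    | succ j =>
      simp only [pairsOf, List.getElem_cons_succ]
      rw [ih (s + b.length) j (by simpa using hj)]
      simp only [offOf, List.take_succ_cons, List.flatten_cons, List.length_append,
        Prod.mk.injEq]
      constructor <;> push_cast <;> ring

lemma chunksGo_flatten_prefix (xs : List String) : ∀ cur,
    ∃ rest, cur ++ xs = (chunksGo cur xs).flatten ++ rest := by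
  induction xs with
  | nil => intro cur; exact ⟨cur, by simp [chunksGo]⟩
  | cons x xs ih =>
    intro cur
    by_cases h : x == "b-1"
    · obtain ⟨rest, hrest⟩ := ih []
      simp only [List.nil_append] at hrest
      exact ⟨rest, by simp [chunksGo, h, List.append_assoc, ← hrest]⟩
    · obtain ⟨rest, hrest⟩ := ih (cur ++ [x])
      exact ⟨rest, by simp [chunksGo, h] at hrest ⊢; simpa using hrest⟩

lemma slice_two_chunks (bars : List (List String)) : ∀ (rest : List String) (i : Nat)
    (hi : i + 1 < bars.length),
    ((bars.flatten ++ rest).drop (offOf bars i)).take (offOf bars (i + 2) - offOf bars i)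
      = bars[i] ++ bars[i + 1] := by
  induction bars with
  | nil => intro rest i hi; simp at hi
  | cons b bs ih =>
    intro rest i hi
    cases i with
    | zero =>
      have hbs : bs ≠ [] := by simp at hi; exact List.ne_nil_of_length_pos hi
      obtain ⟨b2, bs2, rfl⟩ := List.exists_cons_of_ne_nil hbs
      have h2 : (List.take 2 (b :: b2 :: bs2)).flatten.length = b.length + b2.length := by
        simp
      simp only [Nat.zero_add, offOf, List.take_zero, List.flatten_nil, List.length_nil,
        List.drop_zero, Nat.sub_zero, List.flatten_cons, List.getElem_cons_zero,
        List.getElem_cons_succ, List.append_assoc, h2]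
      rw [List.take_length_add_append, List.take_left]
    | succ i =>
      have h1 : offOf (b :: bs) (i + 1) = b.length + offOf bs i := by
        simp [offOf]
      have h2 : offOf (b :: bs) (i + 1 + 2) = b.length + offOf bs (i + 2) := by
        simp [offOf]
      simp only [List.flatten_cons, List.getElem_cons_succ, h1, h2, List.append_assoc]
      rw [List.drop_length_add_append, Nat.add_sub_add_left]
      exact ih rest i (by simpa using hi)

-- dict facts for the full A run on t
lemma dict_items (t : List String) :
    (from_remi_get_bar_idx t).items = keyed 0 (pairsOf 0 (chunksGo [] t)) := by
  have h := afold t 0 0 0 PySem.Dict.empty (by simp)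
  have h2 := pairsGo_eq_pairsOf t [] 0
  simp only [List.length_nil, Nat.cast_zero, add_zero] at h2
  simpa [from_remi_get_bar_idx, h2] using h

lemma dict_getD (t : List String) (j : Nat) (hj : j < (chunksGo [] t).length) :
    (from_remi_get_bar_idx t).getD (j : Int) (0, 0)
      = ((offOf (chunksGo [] t) j : Int), (offOf (chunksGo [] t) (j + 1) : Int)) := by
  have hkeys : (from_remi_get_bar_idx t).keys
      = ((from_remi_get_bar_idx t).items).map (·.1) := rfl
  have hnodup : (from_remi_get_bar_idx t).keys.Nodup := by
    rw [hkeys, dict_items, keyed_map_fst]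
    exact PySem.List.nodup_pyRange_one _ _
  have hjlen : j < (pairsOf 0 (chunksGo [] t)).length := by
    rw [pairsOf_length]; exact hj
  have hjlen2 : j < (keyed 0 (pairsOf 0 (chunksGo [] t))).length := by
    rw [keyed_length]; exact hjlen
  have hmem := List.getElem_mem hjlen2
  rw [keyed_getElem (pairsOf 0 (chunksGo [] t)) 0 j hjlen,
      pairsOf_getElem (chunksGo [] t) 0 j hj] at hmem
  simp only [zero_add] at hmem
  rw [← dict_items] at hmem
  exact PySem.Dict.getD_of_mem_items _ hmem hnodup (0, 0)

lemma core_eq (t : List String) : barLoopA t = pairLoopB t := by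
  obtain ⟨rest, hrest⟩ := chunksGo_flatten_prefix t []
  simp only [List.nil_append] at hrest
  have hsize : (from_remi_get_bar_idx t).size = (chunksGo [] t).length := by
    have : (from_remi_get_bar_idx t).size = ((from_remi_get_bar_idx t).items).length := rfl
    rw [this, dict_items, keyed_length, pairsOf_length]
  have hB : (t.foldl barChunkStep ([], [])).1 = chunksGo [] t := by
    simpa using chunksGo_foldl t [] []
  simp only [barLoopA, pairLoopB]
  rw [hB, hsize, PySem.List.foldl_append_singleton_eq_map, List.nil_append,
      PySem.List.pyRange_one, List.map_map, List.map_map]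
  apply List.map_congr_left
  intro k hk
  have hk2 : k + 1 < (chunksGo [] t).length := by
    have := List.mem_range.mp hk
    omega
  have hk1 : k < (chunksGo [] t).length := by omega
  simp only [Function.comp_apply, zero_add]
  have hcast : ((k : Int) + 1) = ((k + 1 : Nat) : Int) := by push_cast; ring
  rw [hcast, dict_getD t k hk1, dict_getD t (k + 1) hk2,
      PySem.List.pyGetD_natCast, PySem.List.pyGetD_natCast]
  rw [PySem.List.slice_natCast]
  generalize chunksGo [] t = bars at hrest hk1 hk2 ⊢
  rw [hrest, slice_two_chunks bars rest k hk2,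
      List.getD_eq_getElem _ _ hk1, List.getD_eq_getElem _ _ hk2]

-- ===== VERDICT (by name: the statement is the Claim_ definition above) =====
theorem song_remi_split_to_segments_spec : Claim_equal_song_remi_split_to_segments := by
  intro remi_seq ts_and_tempo _ hpre
  unfold Spec_song_remi_split_to_segments song_remi_split_to_segments song_remi_split_to_segments_alt
  cases ts_and_tempo with
  | false => simpa using core_eq (["b-1"] ++ remi_seq)
  | true =>
    have hlen : 2 ≤ remi_seq.length := hpre rfl
    obtain ⟨a, b, l, rfl⟩ : ∃ a b l, remi_seq = a :: b :: l := by
      match remi_seq, hlen with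
      | a :: b :: l, _ => exact ⟨a, b, l, rfl⟩
    simpa [PySem.List.pyGet?, PySem.List.pyIdx?] using core_eq ([a, b, "b-1"] ++ a :: b :: l)
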